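-- pv_equiv track=rewrite | github.com/HemantHssn/python-scripts | hackerrank/company/simens/simens.py | solve
-- ===== SOURCE A (Python) =====
-- def solve(start, stop):
--     s = 0
--     for n in range(start, stop+1):
--         temp = n
--         flag = 0
--         while(n):
--             k = n % 10
--             if k==0 or (temp % k != 0):
--                 flag = 1
--                 break
--             n //= 10
--         if flag==0:
--             s += temp
--
--     return s
-- ===== SOURCE B (Python) =====
-- def _gcd(a, b):
--     while b:
--         a, b = b, a % b
--     return a
--
--
-- def solve(start, stop):
--     # negatives and 0 never add anything, so scan only the positive part;
--     # per number: accumulate the lcm of its digits, then one divisibility test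
--     total = 0
--     for n in range(max(start, 1), stop + 1):
--         l = 1
--         m = n
--         while m:
--             d = m % 10
--             if d == 0:
--                 l = 0
--                 break
--             l = l * d // _gcd(l, d)
--             m //= 10
--         if l and n % l == 0:
--             total += n
--     return total
-- ===== Notes on version B (the rewrite author's own statement) =====
-- stated objective: alternative
-- what changed: B scans only the positive part of the range (negatives and 0 never contribute) and replaces A's per-digit modulus test with break flag by accumulating the lcm of the digits (Euclid gcd) and doing a single divisibility test per number.
-- outside the precondition, e.g. on solve(-20, -10): A returns 0, B returns 0; on solve(-9, -9): A does not finish within the time limit, B returns 0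
import Mathlib
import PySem

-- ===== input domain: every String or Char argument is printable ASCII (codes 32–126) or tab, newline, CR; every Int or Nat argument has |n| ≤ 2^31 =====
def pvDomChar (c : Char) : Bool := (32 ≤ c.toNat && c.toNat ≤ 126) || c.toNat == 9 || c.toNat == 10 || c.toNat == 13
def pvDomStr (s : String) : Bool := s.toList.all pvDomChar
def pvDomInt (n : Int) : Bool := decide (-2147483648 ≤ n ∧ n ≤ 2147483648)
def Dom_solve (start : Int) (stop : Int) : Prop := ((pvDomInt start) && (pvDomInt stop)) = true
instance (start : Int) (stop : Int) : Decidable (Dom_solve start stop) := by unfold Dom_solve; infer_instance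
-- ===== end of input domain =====

-- B replaces A's per-digit modulus test (break flag) by accumulating the lcm of the digits
-- and doing one divisibility test per number, scanning only the positive part of the range
-- (objective: alternative; equivalence is about the return value only).

-- ===== PORT A =====
-- A's inner `while(n)` loop: returns the final `flag`; fuel makes the loop total
-- (fuel n.natAbs + 1 is enough for every n the claim covers).
def solveFlag (temp : Int) : Nat → Int → Int
  | 0, _ => 0
  | f + 1, n =>
    if n == 0 then 0
    else
      let k := PySem.Int.mod n 10
      if k == 0 || !(PySem.Int.mod temp k == 0) then 1
      else solveFlag temp f (PySem.Int.floordiv n 10)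

def solve (start : Int) (stop : Int) : Int :=
  (PySem.List.pyRange start (stop + 1) 1).foldl
    (fun s n => if solveFlag n (n.natAbs + 1) n == 0 then s + n else s) 0

-- ===== PORT B =====
-- Euclid's gcd from Source B (`while b: a, b = b, a % b`); fuel makes the loop total.
def altGcd : Nat → Int → Int → Int
  | 0, a, _ => a
  | f + 1, a, b => if b == 0 then a else altGcd f b (PySem.Int.mod a b)

-- Source B's digit loop: running lcm `l` of the digits of `m`, 0 as soon as a digit is 0.
def altDigitLcm : Nat → Int → Int → Int
  | 0, l, _ => l
  | f + 1, l, m =>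
    if m == 0 then l
    else
      let d := PySem.Int.mod m 10
      if d == 0 then 0
      else altDigitLcm f
            (PySem.Int.floordiv (l * d) (altGcd (l.natAbs + d.natAbs + 1) l d))
            (PySem.Int.floordiv m 10)

def solve_alt (start : Int) (stop : Int) : Int :=
  (PySem.List.pyRange (max start 1) (stop + 1) 1).foldl
    (fun total n =>
      let l := altDigitLcm (n.natAbs + 1) 1 n
      if !(l == 0) && (PySem.Int.mod n l == 0) then total + n else total) 0

-- ===== PRECONDITION & SPEC =====
-- Pre_ excludes ranges that reach below -8: there A's floor-division digit loop can run
-- forever (e.g. n = -9 gives k = 1, n = -1, then k = 9 with temp % 9 == 0 forever); on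
-- such ranges that do happen to terminate A merely skips every negative n and returns the
-- same sum B does.
def Pre_solve (start : Int) (stop : Int) : Prop := -8 ≤ start ∨ stop < start
instance (start : Int) (stop : Int) : Decidable (Pre_solve start stop) := by
  unfold Pre_solve; infer_instance

def pvWitness_solve : Int × Int := (-5, 30)

def Spec_solve (start : Int) (stop : Int) (out : Int) : Prop := out = solve_alt start stop
instance (start : Int) (stop : Int) (out : Int) : Decidable (Spec_solve start stop out) := by
  unfold Spec_solve; infer_instance

-- ===== CLAIM (what is proved, stated in full; the proofs are below) =====
def Claim_equal_solve : Prop := ∀ (start : Int) (stop : Int), Dom_solve start stop →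
  Pre_solve start stop → Spec_solve start stop (solve start stop)

-- ===== LEMMAS AND PROOFS =====

-- Specification-side digit lcm: lcm of the decimal digits of m (1 for m = 0),
-- 0 iff some digit of m is 0.
def dLcm (m : Nat) : Nat :=
  if h : m = 0 then 1 else Nat.lcm (m % 10) (dLcm (m / 10))
decreasing_by exact Nat.div_lt_self (Nat.pos_of_ne_zero h) (by norm_num)

lemma natCast_lcm_dvd_iff (a b : Nat) (t : Int) :
    (↑(Nat.lcm a b) : Int) ∣ t ↔ (↑a : Int) ∣ t ∧ (↑b : Int) ∣ t := by
  rw [Int.natCast_dvd, Int.natCast_dvd, Int.natCast_dvd, Nat.lcm_dvd_iff]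

lemma altGcd_spec : ∀ (f aN bN : Nat), bN < f →
    altGcd f (↑aN) (↑bN) = ↑(Nat.gcd aN bN) := by
  intro f
  induction f with
  | zero => intro aN bN h; omega
  | succ f ih =>
    intro aN bN h
    simp only [altGcd]
    by_cases hb : bN = 0
    · subst hb; simp [Nat.gcd_zero_right]
    · have : ((bN : Int) == 0) = false := by simp [hb]
      rw [this]
      simp only [Bool.false_eq_true, if_false, PySem.Int.mod_natCast]
      rw [ih bN (aN % bN) (by have := Nat.mod_lt aN (Nat.pos_of_ne_zero hb); omega)]
      congr 1
      rw [Nat.gcd_comm bN (aN % bN), ← Nat.gcd_rec bN aN, Nat.gcd_comm]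

lemma altDigitLcm_spec : ∀ (f lN mN : Nat), 0 < lN → mN < f →
    altDigitLcm f (↑lN) (↑mN) =
      if dLcm mN = 0 then 0 else ↑(Nat.lcm lN (dLcm mN)) := by
  intro f
  induction f with
  | zero => intro lN mN _ h; omega
  | succ f ih =>
    intro lN mN hl h
    simp only [altDigitLcm]
    by_cases hm : mN = 0
    · subst hm
      rw [dLcm]
      simp [Nat.lcm_one_right]
    · have hm' : ((mN : Int) == 0) = false := by simp [hm]
      rw [hm']
      have hmod : PySem.Int.mod (↑mN) 10 = ↑(mN % 10) := by
        rw [show (10:Int) = ((10:Nat):Int) by norm_num, PySem.Int.mod_natCast]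
      have hdiv : PySem.Int.floordiv (↑mN) 10 = ((↑(mN / 10) : Int)) := by
        rw [show (10:Int) = ((10:Nat):Int) by norm_num, PySem.Int.floordiv_natCast]
      simp only [Bool.false_eq_true, if_false, hmod, hdiv]
      rw [dLcm]; simp only [hm, dif_neg, not_false_iff]
      by_cases hd : mN % 10 = 0
      · simp [hd, Nat.lcm_zero_left]
      · have hd' : ((↑(mN % 10) : Int) == 0) = false := by
          simp only [beq_eq_false_iff_ne, ne_eq, Int.natCast_eq_zero]; exact hd
        rw [hd']
        simp only [Bool.false_eq_true, if_false]
        have hgcd : altGcd ((↑lN : Int).natAbs + (↑(mN % 10) : Int).natAbs + 1) (↑lN) (↑(mN % 10))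
            = ↑(Nat.gcd lN (mN % 10)) := by
          apply altGcd_spec
          simp only [Int.natAbs_natCast]
          omega
        rw [hgcd]
        have hmul : (↑lN : Int) * ↑(mN % 10) = ↑(lN * (mN % 10)) := by push_cast; ring
        rw [hmul, PySem.Int.floordiv_natCast]
        have hlcm : lN * (mN % 10) / Nat.gcd lN (mN % 10) = Nat.lcm lN (mN % 10) := rfl
        rw [hlcm]
        have hlt : mN / 10 < f := by
          have := Nat.div_lt_self (Nat.pos_of_ne_zero hm) (by norm_num : (1:Nat) < 10)
          omega
        rw [ih (Nat.lcm lN (mN % 10)) (mN / 10)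
              (Nat.lcm_pos hl (Nat.pos_of_ne_zero hd)) hlt]
        by_cases hrest : dLcm (mN / 10) = 0
        · simp [hrest, Nat.lcm_zero_right]
        · have : Nat.lcm (mN % 10) (dLcm (mN / 10)) ≠ 0 := by
            have := Nat.lcm_pos (Nat.pos_of_ne_zero hd) (Nat.pos_of_ne_zero hrest)
            omega
          simp [hrest, this, Nat.lcm_assoc]

lemma solveFlag_spec : ∀ (f : Nat) (temp : Int) (mN : Nat), mN < f →
    solveFlag temp f (↑mN) =
      if dLcm mN ≠ 0 ∧ (↑(dLcm mN) : Int) ∣ temp then 0 else 1 := by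
  intro f
  induction f with
  | zero => intro temp mN h; omega
  | succ f ih =>
    intro temp mN h
    simp only [solveFlag]
    by_cases hm : mN = 0
    · subst hm
      rw [dLcm]
      simp
    · have hm' : ((mN : Int) == 0) = false := by simp [hm]
      rw [hm']
      have hmod : PySem.Int.mod (↑mN) 10 = ↑(mN % 10) := by
        rw [show (10:Int) = ((10:Nat):Int) by norm_num, PySem.Int.mod_natCast]
      have hdiv : PySem.Int.floordiv (↑mN) 10 = ((↑(mN / 10) : Int)) := by
        rw [show (10:Int) = ((10:Nat):Int) by norm_num, PySem.Int.floordiv_natCast]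
      simp only [Bool.false_eq_true, if_false, hmod, hdiv]
      rw [dLcm]; simp only [hm, dif_neg, not_false_iff]
      by_cases hd : mN % 10 = 0
      · simp [hd, Nat.lcm_zero_left]
      · have hd' : ((↑(mN % 10) : Int) == 0) = false := by
          simp only [beq_eq_false_iff_ne, ne_eq, Int.natCast_eq_zero]; exact hd
        rw [hd']
        by_cases hdvd : (↑(mN % 10) : Int) ∣ temp
        · have hx : (PySem.Int.mod temp ↑(mN % 10) == 0) = true := by
            rw [beq_iff_eq, PySem.Int.mod_eq_zero_iff_dvd]; exact hdvd
          rw [hx]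
          simp only [Bool.not_true, Bool.or_false, Bool.false_eq_true, if_false]
          have hlt : mN / 10 < f := by
            have := Nat.div_lt_self (Nat.pos_of_ne_zero hm) (by norm_num : (1:Nat) < 10)
            omega
          rw [ih temp (mN / 10) hlt]
          have hiff : (dLcm (mN/10) ≠ 0 ∧ (↑(dLcm (mN/10)) : Int) ∣ temp) ↔
              (Nat.lcm (mN%10) (dLcm (mN/10)) ≠ 0 ∧
                (↑(Nat.lcm (mN%10) (dLcm (mN/10))) : Int) ∣ temp) := by
            rw [natCast_lcm_dvd_iff]
            constructor
            · rintro ⟨h1, h2⟩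
              refine ⟨?_, hdvd, h2⟩
              have := Nat.lcm_pos (Nat.pos_of_ne_zero hd) (Nat.pos_of_ne_zero h1)
              omega
            · rintro ⟨h1, _, h3⟩
              refine ⟨?_, h3⟩
              intro h0
              rw [h0, Nat.lcm_zero_right] at h1
              exact h1 rfl
          rw [if_congr hiff rfl rfl]
        · have hx : (PySem.Int.mod temp ↑(mN % 10) == 0) = false := by
            simp only [beq_eq_false_iff_ne, ne_eq, PySem.Int.mod_eq_zero_iff_dvd]
            exact hdvd
          rw [hx]
          simp only [Bool.not_false, Bool.or_true, if_true]
          rw [if_neg]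
          rintro ⟨hne, hdv⟩
          apply hdvd
          exact dvd_trans (Int.natCast_dvd_natCast.mpr (Nat.dvd_lcm_left _ _)) hdv

-- pointwise: for n ≥ 1 the two per-number fold steps agree
lemma step_agree (s n : Int) (hn : 1 ≤ n) :
    (if solveFlag n (n.natAbs + 1) n == 0 then s + n else s) =
      (let l := altDigitLcm (n.natAbs + 1) 1 n
       if !(l == 0) && (PySem.Int.mod n l == 0) then s + n else s) := by
  obtain ⟨mN, rfl⟩ : ∃ mN : Nat, n = ↑mN := ⟨n.toNat, (Int.toNat_of_nonneg (by omega)).symm⟩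
  have hma : ((mN : Int)).natAbs = mN := Int.natAbs_natCast mN
  rw [hma]
  rw [solveFlag_spec (mN + 1) _ mN (by omega)]
  have h1 : (1 : Int) = ((1 : Nat) : Int) := by norm_num
  rw [h1, altDigitLcm_spec (mN + 1) 1 mN (by omega) (by omega)]
  by_cases h0 : dLcm mN = 0
  · simp [h0]
  · have hlcm : Nat.lcm 1 (dLcm mN) = dLcm mN := Nat.lcm_one_left _
    simp only [h0, if_false, hlcm]
    have hne : ((↑(dLcm mN) : Int) == 0) = false := by
      simp only [beq_eq_false_iff_ne, ne_eq, Int.natCast_eq_zero]; exact h0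
    simp only [hne, Bool.not_false, Bool.true_and]
    by_cases hdvd : (↑(dLcm mN) : Int) ∣ ↑mN
    · have hx : (PySem.Int.mod (↑mN) (↑(dLcm mN)) == 0) = true := by
        rw [beq_iff_eq, PySem.Int.mod_eq_zero_iff_dvd]; exact hdvd
      simp [h0, hdvd]
    · have hx : (PySem.Int.mod (↑mN) (↑(dLcm mN)) == 0) = false := by
        simp only [beq_eq_false_iff_ne, ne_eq, PySem.Int.mod_eq_zero_iff_dvd]; exact hdvd
      simp [h0, hdvd]

-- the elements -8..0 contribute nothing to A's fold
lemma step_trivial (s n : Int) (h1 : -8 ≤ n) (h2 : n ≤ 0) :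
    (if solveFlag n (n.natAbs + 1) n == 0 then s + n else s) = s := by
  interval_cases n <;>
    first
      | rw [if_neg (by decide)]
      | rw [if_pos (by decide), add_zero]

lemma foldl_trivial (L : List Int) (hL : ∀ n ∈ L, -8 ≤ n ∧ n ≤ 0) (s : Int) :
    L.foldl (fun s n => if solveFlag n (n.natAbs + 1) n == 0 then s + n else s) s = s := by
  induction L generalizing s with
  | nil => rfl
  | cons x xs ih =>
    simp only [List.foldl_cons]
    rw [step_trivial s x (hL x (by simp)).1 (hL x (by simp)).2]
    exact ih (fun n hn => hL n (by simp [hn])) s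

-- ===== VERDICT (by name: the statement is the Claim_ definition above) =====
theorem solve_spec : Claim_equal_solve := by
  intro start stop _ hpre
  unfold Spec_solve solve solve_alt
  by_cases hb : stop < start
  · rw [PySem.List.pyRange_one_eq_nil (by omega),
        PySem.List.pyRange_one_eq_nil (by omega : stop + 1 <= max start 1)]
    rfl
  · have hs : -8 ≤ start := by
      rcases hpre with h | h
      · exact h
      · omega
    by_cases h1 : 1 ≤ start
    · rw [max_eq_left (by omega)]
      apply PySem.List.foldl_congr_mem
      intro acc x hx
      have hx1 : 1 ≤ x := le_trans h1 (PySem.List.mem_pyRange_one.mp hx).1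
      exact step_agree acc x hx1
    · rw [max_eq_right (by omega : start ≤ 1)]
      by_cases h2 : stop + 1 ≤ 1
      · rw [PySem.List.pyRange_one_eq_nil h2]
        apply foldl_trivial
        intro n hn
        have := PySem.List.mem_pyRange_one.mp hn
        omega
      · rw [PySem.List.pyRange_one_append start 1 (stop + 1) (by omega) (by omega),
            List.foldl_append]
        rw [foldl_trivial _ (fun n hn => by
              have := PySem.List.mem_pyRange_one.mp hn; omega) 0]
        apply PySem.List.foldl_congr_mem
        intro acc x hx
        exact step_agree acc x (PySem.List.mem_pyRange_one.mp hx).1
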